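-- pv_equiv track=rewrite | github.com/BaronVice/Inf2025 | _23/_19253.py | F
-- ===== SOURCE A (Python) =====
-- def F(n, used19, used29):
--     if n == 6 and used19 and used29:
--         return 1
--     if n == 29:
--         used29 = 1
--     if n == 19:
--         used19 = 1
--     if n == 24:
--         return 0
--     if n < 6:
--         return 0
--
--     return F(n - 1, used19, used29) + F(n - 6, used19, used29) + F(n // 2, used19, used29)
-- ===== SOURCE B (Python) =====
-- def F(n, used19, used29):
--     # bottom-up DP over (i, flag-state); state s = e19 + 2*e29
--     if n < 6:
--         return 0
--     tab = [[0, 0, 0, 0] for _ in range(6)]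
--     for i in range(6, n + 1):
--         if i == 6:
--             row = [0, 0, 0, 1]
--         elif i == 24:
--             row = [0, 0, 0, 0]
--         else:
--             def cell(s):
--                 a = s % 2
--                 b = s // 2
--                 a2 = 1 if (i == 19 or a) else 0
--                 b2 = 1 if (i == 29 or b) else 0
--                 s2 = a2 + 2 * b2
--                 return tab[i - 1][s2] + tab[i - 6][s2] + tab[i // 2][s2]
--             row = [cell(s) for s in range(4)]
--         tab.append(row)
--     return tab[n][(1 if used19 else 0) + 2 * (1 if used29 else 0)]
-- ===== Notes on version B (the rewrite author's own statement) =====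
-- stated objective: faster
-- what changed: Replaced the exponential three-way recursion with a bottom-up dynamic-programming table indexed by (i, flag-state), computing each of the 4 flag states once per i; Pre_ excludes only n > 1000, where Python A never returns within the interpreter's limits (its exponential recursion diverges in practice, and once the n->n-1 descent of about n-24 frames exceeds the stack's recursion limit it raises RecursionError).
import Mathlib
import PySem

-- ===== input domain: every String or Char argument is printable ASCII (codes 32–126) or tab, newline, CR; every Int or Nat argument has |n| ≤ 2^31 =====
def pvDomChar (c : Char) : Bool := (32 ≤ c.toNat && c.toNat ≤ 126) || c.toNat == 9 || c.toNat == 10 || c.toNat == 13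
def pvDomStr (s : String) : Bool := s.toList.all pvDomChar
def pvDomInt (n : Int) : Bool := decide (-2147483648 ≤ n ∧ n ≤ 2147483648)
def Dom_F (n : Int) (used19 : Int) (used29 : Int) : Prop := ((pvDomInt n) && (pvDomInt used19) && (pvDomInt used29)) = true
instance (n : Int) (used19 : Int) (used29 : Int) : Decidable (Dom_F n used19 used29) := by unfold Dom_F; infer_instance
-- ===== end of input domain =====

-- B replaces A's exponential three-way recursion by a bottom-up DP table over (i, flag-state).

-- ===== PORT A =====
def F (n : Int) (used19 : Int) (used29 : Int) : Int :=
  if n = 6 ∧ used19 ≠ 0 ∧ used29 ≠ 0 then 1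
  else
    let used29' := if n = 29 then 1 else used29
    let used19' := if n = 19 then 1 else used19
    if n = 24 then 0
    else if n < 6 then 0
    else
      F (n - 1) used19' used29' + F (n - 6) used19' used29'
        + F (PySem.Int.floordiv n 2) used19' used29'
termination_by n.toNat
decreasing_by
  · omega
  · omega
  · rw [PySem.Int.floordiv_eq_ediv_of_pos (by omega : (0:Int) < 2)]; omega

-- ===== PORT B =====
-- tab[j][s2] for the three already-computed smaller indices, state updated by i's flags
def cellB (tab : List (List Int)) (i : Int) (s : Int) : Int :=
  let a := PySem.Int.mod s 2
  let b := PySem.Int.floordiv s 2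
  let a2 : Int := if i = 19 ∨ a ≠ 0 then 1 else 0
  let b2 : Int := if i = 29 ∨ b ≠ 0 then 1 else 0
  let s2 := a2 + 2 * b2
  PySem.List.pyGetD (PySem.List.pyGetD tab (i - 1) []) s2 0
    + PySem.List.pyGetD (PySem.List.pyGetD tab (i - 6) []) s2 0
    + PySem.List.pyGetD (PySem.List.pyGetD tab (PySem.Int.floordiv i 2) []) s2 0

def rowB (tab : List (List Int)) (i : Int) : List Int :=
  if i = 6 then [0, 0, 0, 1]
  else if i = 24 then [0, 0, 0, 0]
  else (PySem.List.pyRange 0 4 1).map (cellB tab i)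

def F_alt (n : Int) (used19 : Int) (used29 : Int) : Int :=
  if n < 6 then 0
  else
    let tab := (PySem.List.pyRange 6 (n + 1) 1).foldl
      (fun tab i => tab ++ [rowB tab i]) (List.replicate 6 [0, 0, 0, 0])
    PySem.List.pyGetD (PySem.List.pyGetD tab n [])
      ((if used19 ≠ 0 then 1 else 0) + 2 * (if used29 ≠ 0 then 1 else 0)) 0

-- ===== PRECONDITION & SPEC =====
-- Pre_ excludes only n > 1000: there Python A never returns within the interpreter's limits —
-- its exponential recursion diverges in practice, and once the n→n−1 descent (about n−24 stack
-- frames) exceeds the stack's recursion limit it raises RecursionError. Every input on which A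
-- returns in practice is inside Pre_.
def Pre_F (n : Int) (_used19 : Int) (_used29 : Int) : Prop := n ≤ 1000
instance (n : Int) (used19 : Int) (used29 : Int) : Decidable (Pre_F n used19 used29) := by unfold Pre_F; infer_instance
def pvWitness_F : Int × Int × Int := (20, 1, 0)

def Spec_F (n : Int) (used19 : Int) (used29 : Int) (out : Int) : Prop := out = F_alt n used19 used29
instance (n : Int) (used19 : Int) (used29 : Int) (out : Int) : Decidable (Spec_F n used19 used29 out) := by unfold Spec_F; infer_instance

-- ===== CLAIM (what is proved, stated in full; the proofs are below) =====
def Claim_equal_F : Prop := ∀ (n : Int) (used19 : Int) (used29 : Int), Dom_F n used19 used29 → Pre_F n used19 used29 → Spec_F n used19 used29 (F n used19 used29)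

-- ===== LEMMAS AND PROOFS =====

-- helper: table lookup tab[j][s]
def lookB (tab : List (List Int)) (j s : Int) : Int :=
  PySem.List.pyGetD (PySem.List.pyGetD tab j []) s 0

-- the table after k loop iterations
def tabOf (k : Nat) : List (List Int) :=
  (PySem.List.pyRange 6 (6 + (k : Int)) 1).foldl
    (fun tab i => tab ++ [rowB tab i]) (List.replicate 6 [0, 0, 0, 0])

-- tab[j][s] = F j a b whenever the flags a, b have the truthiness encoded by state s
def GoodB (tab : List (List Int)) (m : Int) : Prop :=
  ∀ j s a b : Int, 0 ≤ j → j < m → 0 ≤ s → s < 4 →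
    (a ≠ 0 ↔ s % 2 = 1) → (b ≠ 0 ↔ s / 2 = 1) → lookB tab j s = F j a b

lemma F_small (n a b : Int) (h : n < 6) : F n a b = 0 := by
  rw [F]; dsimp only; split_ifs <;> first | rfl | omega

lemma F_24 (a b : Int) : F 24 a b = 0 := by
  rw [F]; dsimp only; split_ifs <;> first | rfl | omega

lemma F_six (a b : Int) (h : a = 0 ∨ b = 0) : F 6 a b = 0 := by
  rw [F]; dsimp only
  rw [if_neg (show ¬((6 : Int) = 6 ∧ a ≠ 0 ∧ b ≠ 0) by omega)]
  rw [F_small _ _ _ (by omega), F_small _ _ _ (by omega),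
    F_small _ _ _ (by rw [PySem.Int.floordiv_eq_ediv_of_pos (by omega)]; omega)]
  norm_num

lemma F_unfold_big (i a b : Int) (h7 : 7 ≤ i) (h24 : i ≠ 24) :
    F i a b
      = F (i - 1) (if i = 19 then 1 else a) (if i = 29 then 1 else b)
        + F (i - 6) (if i = 19 then 1 else a) (if i = 29 then 1 else b)
        + F (PySem.Int.floordiv i 2) (if i = 19 then 1 else a) (if i = 29 then 1 else b) := by
  rw [F]; dsimp only
  rw [if_neg (by omega), if_neg h24, if_neg (by omega)]

lemma lookB_append (tab : List (List Int)) (r : List Int) (j s : Int)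
    (h0 : 0 ≤ j) (h : j < (tab.length : Int)) :
    lookB (tab ++ [r]) j s = lookB tab j s := by
  unfold lookB
  rw [PySem.List.pyGetD_eq_getElem (tab ++ [r]) [] h0 (by simp; omega),
    PySem.List.pyGetD_eq_getElem tab [] h0 h]
  congr 1
  exact List.getElem_append_left (by omega)

lemma lookB_last (tab : List (List Int)) (r : List Int) (s : Int) :
    lookB (tab ++ [r]) (tab.length : Int) s = PySem.List.pyGetD r s 0 := by
  unfold lookB
  rw [PySem.List.pyGetD_eq_getElem (tab ++ [r]) [] (by omega) (by simp)]
  congr 1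
  simp

lemma tabOf_zero : tabOf 0 = List.replicate 6 [0, 0, 0, 0] := by
  unfold tabOf
  rw [show (6 + ((0 : Nat) : Int)) = 6 by norm_num, PySem.List.pyRange_one_eq_nil (by omega)]
  rfl

lemma tabOf_succ (k : Nat) :
    tabOf (k + 1) = tabOf k ++ [rowB (tabOf k) (6 + (k : Int))] := by
  unfold tabOf
  rw [show (6 + ((k + 1 : Nat) : Int)) = (6 + (k : Int)) + 1 by push_cast; ring,
    PySem.List.pyRange_one_succ_right (by omega), List.foldl_append]
  rfl

lemma sum3 (tab : List (List Int)) (m i s2 a' b' : Int) (hG : GoodB tab m)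
    (h7 : 7 ≤ i) (him : i ≤ m) (hs0 : 0 ≤ s2) (hs4 : s2 < 4)
    (ha' : a' ≠ 0 ↔ s2 % 2 = 1) (hb' : b' ≠ 0 ↔ s2 / 2 = 1) :
    lookB tab (i - 1) s2 + lookB tab (i - 6) s2 + lookB tab (PySem.Int.floordiv i 2) s2
      = F (i - 1) a' b' + F (i - 6) a' b' + F (PySem.Int.floordiv i 2) a' b' := by
  have hfd : PySem.Int.floordiv i 2 = i / 2 := PySem.Int.floordiv_eq_ediv_of_pos (by omega)
  rw [hG (i - 1) s2 a' b' (by omega) (by omega) hs0 hs4 ha' hb',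
    hG (i - 6) s2 a' b' (by omega) (by omega) hs0 hs4 ha' hb',
    hG (PySem.Int.floordiv i 2) s2 a' b' (by rw [hfd]; omega) (by rw [hfd]; omega) hs0 hs4 ha' hb']

lemma inv (k : Nat) :
    (tabOf k).length = 6 + k ∧ GoodB (tabOf k) (6 + (k : Int)) := by
  induction k with
  | zero =>
    constructor
    · rw [tabOf_zero]; rfl
    · intro j s a b h0 hjm hs0 hs4 ha hb
      rw [tabOf_zero]
      have : lookB (List.replicate 6 [0, 0, 0, 0]) j s = 0 := by
        unfold lookB
        rw [PySem.List.pyGetD_eq_getElem (List.replicate 6 [0, 0, 0, 0]) [] h0 (by simp; omega),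
          List.getElem_replicate]
        rw [PySem.List.pyGetD_eq_getElem [0, 0, 0, 0] 0 hs0 (by simp; omega)]
        interval_cases s <;> rfl
      rw [this, F_small _ _ _ (by omega)]
  | succ k ih =>
    obtain ⟨hlen, hG⟩ := ih
    refine ⟨by rw [tabOf_succ]; simp [hlen]; omega, ?_⟩
    intro j s a b h0 hjm hs0 hs4 ha hb
    rw [tabOf_succ]
    by_cases hj : j < 6 + (k : Int)
    · rw [lookB_append _ _ _ _ h0 (by rw [hlen]; push_cast; omega)]
      exact hG j s a b h0 hj hs0 hs4 ha hb
    · have hj6 : j = 6 + (k : Int) := by omega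
      have hjl : j = ((tabOf k).length : Int) := by rw [hlen]; push_cast; omega
      rw [hjl, lookB_last, ← hjl, hj6]
      unfold rowB
      rcases Nat.eq_zero_or_pos k with hk | hk
      · -- i = 6
        subst hk
        rw [if_pos (by norm_num)]
        interval_cases s
        · rw [show ((6:Int) + ((0:Nat):Int)) = 6 by norm_num, F_six a b (by omega)]; rfl
        · rw [show ((6:Int) + ((0:Nat):Int)) = 6 by norm_num, F_six a b (by omega)]; rfl
        · rw [show ((6:Int) + ((0:Nat):Int)) = 6 by norm_num, F_six a b (by omega)]; rfl
        · rw [show ((6:Int) + ((0:Nat):Int)) = 6 by norm_num]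
          rw [F]; dsimp only
          rw [if_pos (by omega)]; rfl
      · -- i = 6 + k ≥ 7
        have h7 : (7 : Int) ≤ 6 + (k : Int) := by omega
        rw [if_neg (by omega)]
        by_cases h24 : (6 : Int) + (k : Int) = 24
        · rw [if_pos h24, h24, F_24]
          interval_cases s <;> rfl
        · rw [if_neg h24,
            PySem.List.pyGetD_map_pyRange_of_nonneg _ _ _ _ hs0 hs4]
          unfold cellB; dsimp only
          rw [show PySem.Int.mod s 2 = s % 2 from PySem.Int.mod_eq_emod_of_pos (by omega),
            show PySem.Int.floordiv s 2 = s / 2 from PySem.Int.floordiv_eq_ediv_of_pos (by omega)]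
          rw [F_unfold_big _ a b h7 h24]
          split_ifs <;>
            exact sum3 _ _ _ _ _ _ hG h7 (by omega) (by omega) (by omega)
              (by omega) (by omega)

-- ===== VERDICT (by name: the statement is the Claim_ definition above) =====
theorem F_spec : Claim_equal_F := by
  intro n u v _ _
  unfold Spec_F F_alt
  by_cases h6 : n < 6
  · rw [if_pos h6, F_small _ _ _ h6]
  · rw [if_neg h6]; dsimp only
    have hk : n + 1 = 6 + (((n - 5).toNat : Nat) : Int) := by omega
    rw [hk]
    have hinv := (inv (n - 5).toNat).2
    have hlook := hinv n ((if u ≠ 0 then 1 else 0) + 2 * (if v ≠ 0 then 1 else 0)) u v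
      (by omega) (by omega) (by split_ifs <;> omega) (by split_ifs <;> omega)
      (by split_ifs <;> omega) (by split_ifs <;> omega)
    rw [show tabOf (n - 5).toNat = (PySem.List.pyRange 6 (6 + (((n - 5).toNat : Nat) : Int)) 1).foldl (fun tab i => tab ++ [rowB tab i]) (List.replicate 6 [0, 0, 0, 0]) from rfl] at hlook
    exact hlook.symm
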